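-- pv_equiv track=rewrite | github.com/georgeSEC1/BCI | SynthReason interactive sim.py | returnWords
-- ===== SOURCE A (Python) =====
-- def returnWords(dataX,pos,length):
--     ngram = ""
--     n = 0
--     while(n < length and pos+length < len(dataX)-1):
--         if pos+n < len(dataX)-2 and pos+n > 0:
--             ngram += dataX[pos+n] + " "
--         n+=1
--     return ngram
-- ===== SOURCE B (Python) =====
-- def returnWords(dataX, pos, length):
--     if length <= 0 or pos + length >= len(dataX) - 1:
--         return ""
--     lo = max(pos, 1)
--     hi = min(pos + length - 1, len(dataX) - 3)
--     if lo > hi: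
--         return ""
--     return "".join(w + " " for w in dataX[lo:hi + 1])
-- ===== Notes on version B (the rewrite author's own statement) =====
-- stated objective: simpler
-- what changed: Replaces the index-by-index guarded while loop with an arithmetically computed contributing window [max(pos,1), min(pos+length-1, len-3)] followed by one slice-and-join.
import Mathlib
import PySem

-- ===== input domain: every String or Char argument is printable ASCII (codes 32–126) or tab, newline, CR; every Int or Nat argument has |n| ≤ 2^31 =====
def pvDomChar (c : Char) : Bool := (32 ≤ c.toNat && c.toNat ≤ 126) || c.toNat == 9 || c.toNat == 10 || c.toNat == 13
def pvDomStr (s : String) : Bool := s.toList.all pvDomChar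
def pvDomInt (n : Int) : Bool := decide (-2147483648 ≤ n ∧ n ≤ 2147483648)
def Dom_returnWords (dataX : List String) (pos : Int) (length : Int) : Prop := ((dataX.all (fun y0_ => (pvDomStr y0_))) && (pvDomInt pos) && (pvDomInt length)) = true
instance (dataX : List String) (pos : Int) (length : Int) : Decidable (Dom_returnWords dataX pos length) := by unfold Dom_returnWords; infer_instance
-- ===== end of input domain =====

-- B replaces A's index-by-index guarded while loop by a directly computed index window
-- plus one slice-and-join (objective: simpler).

-- ===== PORT A =====
-- the while loop: state (n, ngram); dataX[pos+n] is in range whenever the inner guard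
-- holds (0 < pos+n < len-2), so pyGet? … |>.getD "" is exact there
def returnWordsLoop (dataX : List String) (pos length n : Int) (ngram : String) : String :=
  if _h : n < length ∧ pos + length < (dataX.length : Int) - 1 then
    returnWordsLoop dataX pos length (n + 1)
      (if pos + n < (dataX.length : Int) - 2 ∧ pos + n > 0 then
         ngram ++ ((PySem.List.pyGet? dataX (pos + n)).getD "") ++ " "
       else ngram)
  else ngram
termination_by (length - n).toNat
decreasing_by omega

def returnWords (dataX : List String) (pos : Int) (length : Int) : String :=
  returnWordsLoop dataX pos length 0 ""

-- ===== PORT B =====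
def returnWords_alt (dataX : List String) (pos : Int) (length : Int) : String :=
  if length ≤ 0 ∨ pos + length ≥ (dataX.length : Int) - 1 then ""
  else
    let lo := max pos 1
    let hi := min (pos + length - 1) ((dataX.length : Int) - 3)
    if lo > hi then ""
    else String.join ((PySem.List.slice dataX (some lo) (some (hi + 1))).map (· ++ " "))

-- ===== PRECONDITION & SPEC =====
def Spec_returnWords (dataX : List String) (pos : Int) (length : Int) (out : String) : Prop := out = returnWords_alt dataX pos length
instance (dataX : List String) (pos : Int) (length : Int) (out : String) : Decidable (Spec_returnWords dataX pos length out) := by unfold Spec_returnWords; infer_instance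

-- ===== CLAIM (what is proved, stated in full; the proofs are below) =====
def Claim_equal_returnWords : Prop := ∀ (dataX : List String) (pos : Int) (length : Int), Dom_returnWords dataX pos length → Spec_returnWords dataX pos length (returnWords dataX pos length)

-- ===== LEMMAS AND PROOFS =====

-- the string of words at indices k, k+1, …, m-1 (each with a trailing space)
def pvWindow (dataX : List String) (k m : Int) : String :=
  String.join (((dataX.drop k.toNat).take (m - k).toNat).map (· ++ " "))

theorem pvWindow_empty (dataX : List String) (k m : Int) (h : m ≤ k) :
    pvWindow dataX k m = "" := by
  unfold pvWindow
  have : (m - k).toNat = 0 := by omega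
  simp [this, String.join]

theorem pvJoin_cons (s : String) (l : List String) : String.join (s :: l) = s ++ String.join l := by
  have h : ∀ (l : List String) (a b : String),
      List.foldl (fun r t => r ++ t) (a ++ b) l = a ++ List.foldl (fun r t => r ++ t) b l := by
    intro l
    induction l with
    | nil => intro a b; rfl
    | cons x xs ih => intro a b; simp only [List.foldl_cons, String.append_assoc]; exact ih a (b ++ x)
  simpa [String.join] using h l s ""

theorem pvWindow_cons (dataX : List String) (k m : Int) (h0 : 0 ≤ k) (hk : k < m)
    (hlen : k < (dataX.length : Int)) :
    pvWindow dataX k m = ((PySem.List.pyGet? dataX k).getD "") ++ " " ++ pvWindow dataX (k + 1) m := by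
  unfold pvWindow
  have hk' : k.toNat < dataX.length := by omega
  have hdrop : dataX.drop k.toNat = dataX[k.toNat] :: dataX.drop (k.toNat + 1) := by
    rw [List.drop_eq_getElem_cons hk']
  have h1 : (m - k).toNat = (m - (k + 1)).toNat + 1 := by omega
  have h2 : (k + 1).toNat = k.toNat + 1 := by omega
  rw [hdrop, h1, h2, List.take_succ_cons, List.map_cons]
  have hget : PySem.List.pyGet? dataX k = some dataX[k.toNat] := by
    have hkk : ((k.toNat : ℕ) : Int) = k := by omega
    have h3 := PySem.List.pyGet?_natCast dataX k.toNat
    rw [hkk] at h3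
    rw [h3, List.getElem?_eq_getElem hk']
  rw [hget]
  simp only [Option.getD_some]
  rw [pvJoin_cons]

-- loop invariant: with the outer guard true, the loop appends the window of
-- indices [max (pos+n) 1, pos+length) to the accumulator
theorem returnWordsLoop_eq (dataX : List String) (pos length : Int)
    (hg : pos + length < (dataX.length : Int) - 1) :
    ∀ (fuel : ℕ) (n : Int) (ngram : String), fuel = (length - n).toNat →
      returnWordsLoop dataX pos length n ngram
        = ngram ++ pvWindow dataX (max (pos + n) 1) (pos + length) := by
  intro fuel
  induction fuel with
  | zero =>
    intro n ngram hf
    have hn : ¬ n < length := by omega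
    rw [returnWordsLoop]
    rw [dif_neg (by tauto)]
    rw [pvWindow_empty dataX _ _ (by omega)]
    simp
  | succ f ih =>
    intro n ngram hf
    have hn : n < length := by omega
    rw [returnWordsLoop, dif_pos ⟨hn, hg⟩]
    rw [ih (n + 1) _ (by omega)]
    by_cases hc : pos + n > 0
    · have hcond : pos + n < (dataX.length : Int) - 2 ∧ pos + n > 0 := ⟨by omega, hc⟩
      rw [if_pos hcond]
      have hmax : max (pos + n) 1 = pos + n := by omega
      have hmax' : max (pos + (n + 1)) 1 = pos + n + 1 := by omega
      rw [hmax, hmax']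
      rw [pvWindow_cons dataX (pos + n) (pos + length) (by omega) (by omega) (by omega)]
      simp [String.append_assoc]
    · have hcond : ¬ (pos + n < (dataX.length : Int) - 2 ∧ pos + n > 0) := by tauto
      rw [if_neg hcond]
      have : max (pos + (n + 1)) 1 = max (pos + n) 1 := by omega
      rw [this]

theorem returnWords_spec : Claim_equal_returnWords := by
  unfold Claim_equal_returnWords Spec_returnWords
  intro dataX pos length _
  unfold returnWords returnWords_alt
  by_cases hg : length ≤ 0 ∨ pos + length ≥ (dataX.length : Int) - 1
  · rw [if_pos hg, returnWordsLoop, dif_neg (by omega)]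
  · rw [if_neg hg]
    push_neg at hg
    obtain ⟨hl, hG⟩ := hg
    rw [returnWordsLoop_eq dataX pos length hG ((length - 0).toNat) 0 "" rfl]
    have hhi : min (pos + length - 1) ((dataX.length : Int) - 3) = pos + length - 1 := by omega
    simp only [hhi, add_zero]
    by_cases hlo : max pos 1 > pos + length - 1
    · rw [if_pos hlo]
      rw [pvWindow_empty dataX (max pos 1) (pos + length) (by omega)]
      rfl
    · rw [if_neg hlo]
      push_neg at hlo
      have hmax0 : 0 ≤ max pos 1 := by omega
      have hm : 0 ≤ pos + length - 1 + 1 := by omega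
      rw [PySem.List.slice_toNat dataX hmax0 hm]
      unfold pvWindow
      have hcnt : ((pos + length - 1 + 1).toNat - (max pos 1).toNat) = (pos + length - max pos 1).toNat := by omega
      rw [hcnt]
      simp
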